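-- pv_equiv track=rewrite | github.com/jmgasper/music-assistant-gtk | ui/image_loader.py | normalize_playlist_image_urls
-- ===== SOURCE A (Python) =====
-- def normalize_playlist_image_urls(
--     image_urls: list[str] | None, limit: int = 4
-- ) -> list[str]:
--     if not image_urls:
--         return []
--     normalized = [url for url in image_urls if url]
--     if not normalized:
--         return []
--     if len(normalized) >= limit:
--         return normalized[:limit]
--     index = 0
--     while len(normalized) < limit:
--         normalized.append(normalized[index % len(normalized)])
--         index += 1
--     return normalized
-- ===== SOURCE B (Python) =====
-- def normalize_playlist_image_urls(
--     image_urls: list[str] | None, limit: int = 4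
-- ) -> list[str]:
--     normalized = [url for url in (image_urls or []) if url]
--     if not normalized:
--         return []
--     if len(normalized) >= limit:
--         return normalized[:limit]
--     reps = limit // len(normalized) + 1
--     return (normalized * reps)[:limit]
-- ===== Notes on version B (the rewrite author's own statement) =====
-- stated objective: simpler
-- what changed: B drops A's element-by-element while loop (which appends normalized[index % len] to the growing list it indexes into) and instead tiles whole copies of the filtered list: list multiplication by ceil(limit/len) followed by a single slice; no index variable, no per-element modulo, no mutation of the list being read.
import Mathlib
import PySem

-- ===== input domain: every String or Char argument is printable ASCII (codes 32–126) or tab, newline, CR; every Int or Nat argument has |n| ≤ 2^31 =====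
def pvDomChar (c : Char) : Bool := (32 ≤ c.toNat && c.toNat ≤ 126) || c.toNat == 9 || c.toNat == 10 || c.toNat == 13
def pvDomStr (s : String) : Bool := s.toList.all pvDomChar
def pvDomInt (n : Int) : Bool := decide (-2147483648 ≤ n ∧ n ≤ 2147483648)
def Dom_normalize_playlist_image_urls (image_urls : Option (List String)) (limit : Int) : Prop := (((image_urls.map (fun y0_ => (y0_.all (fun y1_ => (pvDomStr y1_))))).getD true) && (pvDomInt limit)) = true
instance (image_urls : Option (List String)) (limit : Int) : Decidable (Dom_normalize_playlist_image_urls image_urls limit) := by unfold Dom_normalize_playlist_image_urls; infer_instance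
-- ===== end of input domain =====

-- B replaces A's growing-list while loop with whole-list tiling (ceil(limit/len) copies, then one slice); objective: simpler.


-- ===== PORT A =====
-- the while loop: while len(normalized) < limit: normalized.append(normalized[index % len(normalized)]); index += 1
-- (the index 'index % len' is always in range here, so Python's xs[i] is ported as getD with an unused default)
def pvLoopA (normalized : List String) (index limit : Int) : List String :=
  if h : (normalized.length : Int) < limit then
    pvLoopA (normalized ++ [normalized.getD ((PySem.Int.mod index (normalized.length : Int)).toNat) ""])
      (index + 1) limit
  else normalized
termination_by (limit - normalized.length).toNat
decreasing_by simp; omega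

def normalize_playlist_image_urls (image_urls : Option (List String)) (limit : Int) : List String :=
  match image_urls with
  | none => []
  | some urls =>
    if urls = [] then []  -- `if not image_urls` (None handled by the match)
    else
      let normalized := urls.filter (fun u => u != "")
      if normalized = [] then []
      else if limit ≤ (normalized.length : Int) then PySem.List.slice normalized none (some limit)
      else pvLoopA normalized 0 limit

-- ===== PORT B =====
def normalize_playlist_image_urls_alt (image_urls : Option (List String)) (limit : Int) : List String :=
  let normalized := (image_urls.getD []).filter (fun u => u != "")  -- [url for url in (image_urls or []) if url]
  if normalized = [] then []
  else if limit ≤ (normalized.length : Int) then PySem.List.slice normalized none (some limit)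
  else
    -- reps = limit // len(normalized) + 1;  (normalized * reps)[:limit]
    let reps := (PySem.Int.floordiv limit (normalized.length : Int) + 1).toNat
    PySem.List.slice (List.flatten (List.replicate reps normalized)) none (some limit)

-- ===== PRECONDITION & SPEC =====
def Spec_normalize_playlist_image_urls (image_urls : Option (List String)) (limit : Int) (out : List String) : Prop := out = normalize_playlist_image_urls_alt image_urls limit
instance (image_urls : Option (List String)) (limit : Int) (out : List String) : Decidable (Spec_normalize_playlist_image_urls image_urls limit out) := by unfold Spec_normalize_playlist_image_urls; infer_instance

-- ===== CLAIM (what is proved, stated in full; the proofs are below) =====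
def Claim_equal_normalize_playlist_image_urls : Prop := ∀ (image_urls : Option (List String)) (limit : Int), Dom_normalize_playlist_image_urls image_urls limit → Spec_normalize_playlist_image_urls image_urls limit (normalize_playlist_image_urls image_urls limit)

-- ===== LEMMAS AND PROOFS =====

-- The loop invariant: with the list being the first m values of the periodic function
-- j ↦ ns[j % |ns|] and index = m - |ns|, the loop extends the list to max m limit values.
lemma pvLoopA_eq (ns : List String) (hns : ns ≠ []) :
    ∀ (k m idx : Nat) (limit : Int), limit.toNat - m ≤ k → m = ns.length + idx →
    pvLoopA ((List.range m).map (fun j => ns.getD (j % ns.length) "")) (idx : Int) limit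
      = (List.range (max m limit.toNat)).map (fun j => ns.getD (j % ns.length) "") := by
  intro k
  induction k with
  | zero =>
    intro m idx limit hk hm
    rw [pvLoopA]
    have hlen : ((List.range m).map (fun j => ns.getD (j % ns.length) "")).length = m := by simp
    rw [dif_neg (by rw [hlen]; omega)]
    have : max m limit.toNat = m := by omega
    rw [this]
  | succ k ih =>
    intro m idx limit hk hm
    by_cases hlt : (m : Int) < limit
    · have hpos : 0 < ns.length := List.length_pos_iff.mpr hns
      have hidx : idx < m := by omega
      rw [pvLoopA]
      have hlen : ((List.range m).map (fun j => ns.getD (j % ns.length) "")).length = m := by simp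
      rw [dif_pos (by rw [hlen]; exact hlt)]
      have hmod : PySem.Int.mod (idx : Int) ((((List.range m).map (fun j => ns.getD (j % ns.length) "")).length : Nat) : Int) = (idx : Int) := by
        rw [hlen, PySem.Int.mod_eq_emod_of_pos (by omega)]
        exact Int.emod_eq_of_lt (by omega) (by omega)
      have happ : ((List.range m).map (fun j => ns.getD (j % ns.length) "")).getD ((PySem.Int.mod (idx : Int) ((((List.range m).map (fun j => ns.getD (j % ns.length) "")).length : Nat) : Int)).toNat) ""
          = ns.getD (m % ns.length) "" := by
        rw [hmod]
        simp only [Int.toNat_natCast, List.getD_eq_getElem?_getD, List.getElem?_map]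
        have hr : (List.range m)[idx]? = some idx := by
          simp [hidx]
        rw [hr]
        simp [hm, Nat.add_mod_left]
      rw [happ]
      have hstep : ((List.range m).map (fun j => ns.getD (j % ns.length) "")) ++ [ns.getD (m % ns.length) ""]
          = (List.range (m + 1)).map (fun j => ns.getD (j % ns.length) "") := by
        rw [List.range_succ, List.map_append]; rfl
      rw [hstep]
      have hcast : ((idx : Int) + 1) = ((idx + 1 : Nat) : Int) := by push_cast; ring
      rw [hcast, ih (m + 1) (idx + 1) limit (by omega) (by omega)]
      have : max (m + 1) limit.toNat = max m limit.toNat := by omega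
      rw [this]
    · rw [pvLoopA]
      have hlen : ((List.range m).map (fun j => ns.getD (j % ns.length) "")).length = m := by simp
      rw [dif_neg (by rw [hlen]; exact hlt)]
      have : max m limit.toNat = m := by omega
      rw [this]

-- a nonempty list is the first |ns| values of its own periodic extension
lemma ns_as_map (ns : List String) :
    ns = (List.range ns.length).map (fun j => ns.getD (j % ns.length) "") := by
  apply List.ext_getElem (by simp)
  intro i h1 h2
  simp [List.getD_eq_getElem?_getD, Nat.mod_eq_of_lt, h1]

lemma loop_eq_map (ns : List String) (hns : ns ≠ []) (limit : Int)
    (hlt : (ns.length : Int) < limit) :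
    pvLoopA ns 0 limit
      = (List.range limit.toNat).map (fun j => ns.getD (j % ns.length) "") := by
  have h0 : ((0 : Nat) : Int) = (0 : Int) := rfl
  have := pvLoopA_eq ns hns limit.toNat ns.length 0 limit (by omega) (by omega)
  rw [← ns_as_map] at this
  rw [h0] at this
  rw [this]
  have : max ns.length limit.toNat = limit.toNat := by omega
  rw [this]

-- k concatenated copies of ns are the first k*|ns| values of the same periodic map
lemma flatten_replicate_eq_map (ns : List String) (k : Nat) :
    (List.replicate k ns).flatten
      = (List.range (k * ns.length)).map (fun j => ns.getD (j % ns.length) "") := by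
  induction k with
  | zero => simp
  | succ k ih =>
    have hsplit : (k + 1) * ns.length = ns.length + k * ns.length := by ring
    rw [List.replicate_succ, List.flatten_cons, ih, hsplit, List.range_add,
        List.map_append, List.map_map, ← ns_as_map]
    congr 1
    apply List.map_congr_left
    intro j _
    simp [Nat.add_mod_left]

-- ===== VERDICT (by name: the statement is the Claim_ definition above) =====
theorem normalize_playlist_image_urls_spec : Claim_equal_normalize_playlist_image_urls := by
  intro image_urls limit _
  unfold Spec_normalize_playlist_image_urls
  match image_urls with
  | none => rfl
  | some urls =>
    simp only [normalize_playlist_image_urls, normalize_playlist_image_urls_alt, Option.getD_some]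
    by_cases hurls : urls = []
    · subst hurls; simp
    · rw [if_neg hurls]
      by_cases hnorm : urls.filter (fun u => u != "") = []
      · rw [if_pos hnorm, if_pos hnorm]
      · rw [if_neg hnorm, if_neg hnorm]
        by_cases hle : limit ≤ ((urls.filter (fun u => u != "")).length : Int)
        · rw [if_pos hle, if_pos hle]
        · rw [if_neg hle, if_neg hle]
          set ns := urls.filter (fun u => u != "") with hns_def
          have hpos : 0 < ns.length := List.length_pos_iff.mpr hnorm
          have hlt : (ns.length : Int) < limit := by omega
          have hlim0 : (0 : Int) < limit := by omega
          rw [loop_eq_map ns hnorm limit hlt, flatten_replicate_eq_map,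
              PySem.List.slice_to (b := limit) (hb := by omega), ← List.map_take, List.take_range]
          congr 1
          -- min limit.toNat (reps * |ns|) = limit.toNat since reps * |ns| ≥ limit
          have hfd : PySem.Int.floordiv limit (ns.length : Int) = limit / (ns.length : Int) :=
            PySem.Int.floordiv_eq_ediv_of_pos (by omega)
          rw [hfd]
          have hq1 : (0 : Int) ≤ limit / (ns.length : Int) + 1 := by
            have := Int.ediv_nonneg (a := limit) (b := (ns.length : Int)) (by omega) (by omega)
            omega
          have hge : limit ≤ (limit / (ns.length : Int) + 1) * (ns.length : Int) := by
            have := Int.emod_lt_of_pos limit (b := (ns.length : Int)) (by omega)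
            have := Int.emod_nonneg limit (show (ns.length : Int) ≠ 0 by omega)
            have := Int.mul_ediv_add_emod limit (ns.length : Int)
            nlinarith
          have key : limit.toNat ≤ (limit / (ns.length : Int) + 1).toNat * ns.length := by
            have hcast : (((limit / (ns.length : Int) + 1).toNat * ns.length : Nat) : Int)
                = (limit / (ns.length : Int) + 1) * (ns.length : Int) := by
              rw [Nat.cast_mul, Int.toNat_of_nonneg hq1]
            omega
          rw [Nat.min_eq_left key]
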